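-- pv_equiv track=rewrite | github.com/liupengsay/PyIsTheBestLang | src/dp/bag_dp/problem.py | lc_2518
-- ===== SOURCE A (Python) =====
-- from typing import List
--
-- def lc_2518(nums: List[int], k: int) -> int:
--     """
--     url: https://leetcode.cn/problems/number-of-great-partitions/
--     tag: bag_dp|counter
--     """
--
--     mod = 10 ** 9 + 7
--     dp = [0] * k
--     s = sum(nums)
--     if s < 2 * k:
--         return 0
--     dp[0] = 1
--     n = len(nums)
--     for num in nums:
--         for i in range(k - 1, num - 1, -1):
--             dp[i] += dp[i - num]
--     ans = pow(2, n, mod)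
--     ans -= 2 * sum(dp)
--     return ans % mod
-- ===== SOURCE B (Python) =====
-- def lc_2518(nums, k):
--     mod = 10 ** 9 + 7
--     if sum(nums) < 2 * k:
--         return 0
--     n = len(nums)
--     # f[s] = number of subsets of the processed suffix whose total, added to an
--     # already-accumulated sum s, stays strictly below k (suffix DP, back to front)
--     f = [1] * k
--     for num in reversed(nums):
--         f = [f[s] + (f[s + num] if s + num < k else 0) for s in range(k)]
--     return (pow(2, n, mod) - 2 * f[0]) % mod
-- ===== Notes on version B (the rewrite author's own statement) =====
-- stated objective: alternative
-- what changed: Replaces A's forward exact-sum knapsack (in-place array updated with a descending index loop, then summed) by a backward suffix DP rebuilt per item, whose entry f[s] counts subsets of the remaining suffix keeping the running total started at s strictly below k; the answer reads a single entry f[0] instead of summing the whole table.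
import Mathlib
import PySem

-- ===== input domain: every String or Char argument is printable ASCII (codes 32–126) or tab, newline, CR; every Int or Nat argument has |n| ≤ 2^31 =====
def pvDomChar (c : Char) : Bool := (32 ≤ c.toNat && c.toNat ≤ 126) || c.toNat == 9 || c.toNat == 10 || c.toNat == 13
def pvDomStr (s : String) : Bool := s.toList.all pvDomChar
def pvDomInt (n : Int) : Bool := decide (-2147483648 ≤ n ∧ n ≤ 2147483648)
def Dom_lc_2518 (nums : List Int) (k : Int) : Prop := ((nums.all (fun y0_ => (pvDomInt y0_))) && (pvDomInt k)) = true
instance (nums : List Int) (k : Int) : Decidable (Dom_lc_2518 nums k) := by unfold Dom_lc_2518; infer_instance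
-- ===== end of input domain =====

-- B replaces A's forward exact-sum knapsack (in-place, descending indices) by a backward
-- suffix DP counting, for each start total s < k, the subsets keeping the running total
-- below k; same cost (objective: alternative decomposition). No argument is mutated.

-- ===== PORT A =====
-- Index arithmetic uses .toNat: exact for the nonnegative in-range indices Pre_ guarantees
-- (Python raises IndexError exactly on the inputs Pre_ excludes).
def lc_2518 (nums : List Int) (k : Int) : Int :=
  let md : Int := 10 ^ 9 + 7
  let dp : List Int := List.replicate k.toNat 0     -- dp = [0] * k
  let s : Int := nums.sum
  if s < 2 * k then 0
  else
    let dp := dp.set 0 1                            -- dp[0] = 1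
    let n : Nat := nums.length
    let dp := nums.foldl (fun d num =>
      (PySem.List.pyRange (k - 1) (num - 1) (-1)).foldl
        (fun d i => d.set i.toNat (d.getD i.toNat 0 + d.getD (i - num).toNat 0)) d) dp
    let ans := PySem.Int.powMod 2 n md              -- pow(2, n, mod)
    PySem.Int.mod (ans - 2 * dp.sum) md

-- ===== PORT B =====
def lc_2518_alt (nums : List Int) (k : Int) : Int :=
  let md : Int := 10 ^ 9 + 7
  if nums.sum < 2 * k then 0
  else
    let n : Nat := nums.length
    let f : List Int := List.replicate k.toNat 1    -- f = [1] * k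
    let f := nums.reverse.foldl (fun f num =>
      (List.range k.toNat).map (fun (s : Nat) =>
        f.getD s 0 + if (s : Int) + num < k then PySem.List.pyGetD f ((s : Int) + num) 0 else 0)) f
    PySem.Int.mod (PySem.Int.powMod 2 n md - 2 * f.getD 0 0) md

-- ===== PRECONDITION & SPEC =====
-- Pre_ excludes exactly the inputs where A raises IndexError: when the DP actually runs
-- (sum ≥ 2k), Python needs k ≥ 1 (for dp[0] = 1) and nonnegative items (a negative num
-- makes dp[i - num] go out of range on the first inner iteration).
def Pre_lc_2518 (nums : List Int) (k : Int) : Prop :=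
  2 * k ≤ nums.sum → (1 ≤ k ∧ ∀ x ∈ nums, 0 ≤ x)
instance (nums : List Int) (k : Int) : Decidable (Pre_lc_2518 nums k) := by
  unfold Pre_lc_2518; infer_instance
def pvWitness_lc_2518 : List Int × Int := ([1, 1], 1)

def Spec_lc_2518 (nums : List Int) (k : Int) (out : Int) : Prop := out = lc_2518_alt nums k
instance (nums : List Int) (k : Int) (out : Int) : Decidable (Spec_lc_2518 nums k out) := by
  unfold Spec_lc_2518; infer_instance

-- ===== CLAIM (what is proved, stated in full; the proofs are below) =====
def Claim_equal_lc_2518 : Prop := ∀ (nums : List Int) (k : Int),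
  Dom_lc_2518 nums k → Pre_lc_2518 nums k → Spec_lc_2518 nums k (lc_2518 nums k)

-- ===== LEMMAS AND PROOFS =====

-- number of sublists of l whose sum is exactly j
def cntEq : List Int → Int → Int
  | [], j => if j = 0 then 1 else 0
  | a :: t, j => cntEq t j + cntEq t (j - a)

-- number of sublists of l whose sum, added to s, is below k
def cntLt (k : Int) : List Int → Int → Int
  | [], s => if s < k then 1 else 0
  | a :: t, s => cntLt k t s + cntLt k t (s + a)

lemma cntEq_neg (l : List Int) (j : Int) (hl : ∀ x ∈ l, 0 ≤ x) (hj : j < 0) :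
    cntEq l j = 0 := by
  induction l generalizing j with
  | nil => simp [cntEq]; omega
  | cons a t ih =>
    have ha := hl a (by simp)
    have ht : ∀ x ∈ t, 0 ≤ x := fun x hx => hl x (by simp [hx])
    simp [cntEq, ih _ ht hj, ih _ ht (by omega : j - a < 0)]

lemma cntLt_ge (k : Int) (l : List Int) (s : Int) (hl : ∀ x ∈ l, 0 ≤ x) (hs : k ≤ s) :
    cntLt k l s = 0 := by
  induction l generalizing s with
  | nil => simp [cntLt]; omega
  | cons a t ih =>
    have ha := hl a (by simp)
    have ht : ∀ x ∈ t, 0 ≤ x := fun x hx => hl x (by simp [hx])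
    simp [cntLt, ih _ ht hs, ih _ ht (by omega : k ≤ s + a)]

lemma cntEq_append_singleton (p : List Int) (a j : Int) :
    cntEq (p ++ [a]) j = cntEq p j + cntEq p (j - a) := by
  induction p generalizing j with
  | nil => simp [cntEq]
  | cons b t ih =>
    have h : j - b - a = j - a - b := by ring
    simp only [List.cons_append, cntEq, ih, h]
    ring

lemma map_getD_range (d : List Int) :
    (List.range d.length).map (fun (j : Nat) => d.getD j 0) = d := by
  apply List.ext_getElem
  · simp
  · intro i h1 h2
    simp [List.getElem?_eq_getElem h2]

lemma getD_set_ne (d : List Int) (i j : Nat) (v : Int) (h : i ≠ j) :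
    (d.set i v).getD j 0 = d.getD j 0 := by
  simp [List.getD_eq_getElem?_getD, List.getElem?_set_ne h]

lemma getD_set_self (d : List Int) (i : Nat) (v : Int) (h : i < d.length) :
    (d.set i v).getD i 0 = v := by
  rw [List.getD_eq_getElem _ _ (by simpa using h)]; simp

-- A's in-place descending inner loop, as a functional map
lemma foldA_desc (num : Int) (hnum : 0 ≤ num) :
    ∀ (c : Nat) (top : Int) (d : List Int), (top - num + 1).toNat = c →
    (PySem.List.pyRange top (num - 1) (-1)).foldl
        (fun d i => d.set i.toNat (d.getD i.toNat 0 + d.getD (i - num).toNat 0)) d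
    = (List.range d.length).map (fun (j : Nat) =>
        if num ≤ (j : Int) ∧ (j : Int) ≤ top then d.getD j 0 + d.getD (j - num.toNat) 0
        else d.getD j 0) := by
  intro c
  induction c with
  | zero =>
    intro top d hc
    rw [PySem.List.pyRange_neg_one_eq_nil (by omega), List.foldl_nil]
    have h0 : ∀ j ∈ List.range d.length,
        (if num ≤ (j : Int) ∧ (j : Int) ≤ top then d.getD j 0 + d.getD (j - num.toNat) 0
         else d.getD j 0) = d.getD j 0 := by
      intro j _; rw [if_neg (by omega)]
    rw [List.map_congr_left h0, map_getD_range]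
  | succ c ih =>
    intro top d hc
    have htop : num ≤ top := by omega
    rw [PySem.List.pyRange_neg_one_cons (by omega : num - 1 < top)]
    rw [List.foldl_cons]
    set v := d.getD top.toNat 0 + d.getD (top - num).toNat 0 with hv
    rw [ih (top - 1) (d.set top.toNat v) (by omega)]
    have hlen : (d.set top.toNat v).length = d.length := by simp
    rw [hlen]
    apply List.map_congr_left
    intro j hj
    have hjlen : j < d.length := List.mem_range.1 hj
    by_cases hjt : (j : Int) = top
    · have hjtop : j = top.toNat := by omega
      rw [if_neg (by omega), if_pos (by omega)]
      subst hjtop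
      rw [getD_set_self d _ v hjlen, hv]
      congr 2
      omega
    · have hne : top.toNat ≠ j := by omega
      rw [getD_set_ne d _ _ v hne]
      by_cases hcond : num ≤ (j : Int) ∧ (j : Int) ≤ top - 1
      · rw [if_pos hcond, if_pos (by omega)]
        have hne2 : top.toNat ≠ j - num.toNat := by omega
        rw [getD_set_ne d _ _ v hne2]
      · rw [if_neg hcond, if_neg (by omega)]

-- one item of A's outer loop appends the item to the processed prefix
lemma stepA (k num : Int) (p : List Int) (hk : 1 ≤ k) (hnum : 0 ≤ num)
    (hp : ∀ x ∈ p, 0 ≤ x) :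
    (PySem.List.pyRange (k - 1) (num - 1) (-1)).foldl
        (fun d i => d.set i.toNat (d.getD i.toNat 0 + d.getD (i - num).toNat 0))
        ((List.range k.toNat).map (fun (j : Nat) => cntEq p (j : Int)))
    = (List.range k.toNat).map (fun (j : Nat) => cntEq (p ++ [num]) (j : Int)) := by
  have hd := foldA_desc num hnum (k - 1 - num + 1).toNat (k - 1)
    ((List.range k.toNat).map (fun (j : Nat) => cntEq p (j : Int))) rfl
  rw [hd]
  have hlen : ((List.range k.toNat).map (fun (j : Nat) => cntEq p (j : Int))).length
      = k.toNat := by simp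
  rw [hlen]
  apply List.map_congr_left
  intro j hj
  have hjk : j < k.toNat := List.mem_range.1 hj
  rw [cntEq_append_singleton]
  rw [PySem.List.getD_map_range _ _ _ _ hjk]
  by_cases hc : num ≤ (j : Int)
  · rw [if_pos (by constructor <;> omega)]
    rw [PySem.List.getD_map_range _ _ _ _ (by omega : j - num.toNat < k.toNat)]
    congr 1
    congr 1
    omega
  · rw [if_neg (by omega)]
    rw [cntEq_neg p _ hp (by omega : (j : Int) - num < 0)]
    ring

lemma foldA_all (k : Int) (hk : 1 ≤ k) :
    ∀ (l p : List Int), (∀ x ∈ l, 0 ≤ x) → (∀ x ∈ p, 0 ≤ x) →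
    l.foldl (fun d num =>
        (PySem.List.pyRange (k - 1) (num - 1) (-1)).foldl
          (fun d i => d.set i.toNat (d.getD i.toNat 0 + d.getD (i - num).toNat 0)) d)
      ((List.range k.toNat).map (fun (j : Nat) => cntEq p (j : Int)))
    = (List.range k.toNat).map (fun (j : Nat) => cntEq (p ++ l) (j : Int)) := by
  intro l
  induction l with
  | nil => intro p _ _; simp
  | cons a t ih =>
    intro p hl hp
    have ha := hl a (by simp)
    have ht : ∀ x ∈ t, 0 ≤ x := fun x hx => hl x (by simp [hx])
    have hpa : ∀ x ∈ p ++ [a], 0 ≤ x := by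
      intro x hx; rcases List.mem_append.1 hx with h | h
      · exact hp x h
      · simp at h; omega
    simp only [List.foldl_cons, stepA k a p hk ha hp, ih (p ++ [a]) ht hpa,
      List.append_assoc, List.singleton_append]

lemma stepB (k num : Int) (l : List Int) (hnum : 0 ≤ num)
    (hl : ∀ x ∈ l, 0 ≤ x) :
    (List.range k.toNat).map (fun (s : Nat) =>
        ((List.range k.toNat).map (fun (s : Nat) => cntLt k l (s : Int))).getD s 0 +
        if (s : Int) + num < k then
          PySem.List.pyGetD ((List.range k.toNat).map (fun (s : Nat) => cntLt k l (s : Int))) ((s : Int) + num) 0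
        else 0)
    = (List.range k.toNat).map (fun (s : Nat) => cntLt k (num :: l) (s : Int)) := by
  apply List.map_congr_left
  intro s hs
  have hsk : s < k.toNat := List.mem_range.1 hs
  rw [PySem.List.getD_map_range _ _ _ _ hsk]
  simp only [cntLt]
  by_cases hc : (s : Int) + num < k
  · rw [if_pos hc]
    rw [PySem.List.pyGetD_eq_getElem _ _ (by omega) (by simp; omega)]
    simp only [List.getElem_map, List.getElem_range]
    have hcast : ((((s : Int) + num).toNat : Nat) : Int) = (s : Int) + num := by omega
    rw [hcast]
  · rw [if_neg hc]
    rw [cntLt_ge k l ((s : Int) + num) hl (by omega)]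

lemma foldB_all (k : Int) (hk : 1 ≤ k) :
    ∀ (l : List Int), (∀ x ∈ l, 0 ≤ x) →
    l.reverse.foldl (fun f num =>
        (List.range k.toNat).map (fun (s : Nat) =>
          f.getD s 0 + if (s : Int) + num < k then PySem.List.pyGetD f ((s : Int) + num) 0 else 0))
      (List.replicate k.toNat 1)
    = (List.range k.toNat).map (fun (s : Nat) => cntLt k l (s : Int)) := by
  intro l hl
  rw [List.foldl_reverse]
  have hinit : (List.replicate k.toNat (1 : Int))
      = (List.range k.toNat).map (fun (s : Nat) => cntLt k [] (s : Int)) := by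
    apply List.ext_getElem
    · simp
    · intro i h1 h2
      simp only [List.length_replicate] at h1
      simp [cntLt, List.getElem_replicate, if_pos (by omega : (i : Int) < k)]
  rw [hinit]
  induction l with
  | nil => simp
  | cons a t ih =>
    have ha := hl a (by simp)
    have ht : ∀ x ∈ t, 0 ≤ x := fun x hx => hl x (by simp [hx])
    simp only [List.foldr_cons, ih ht]
    exact stepB k a t ha ht

-- counting j ∈ range n with (j : Int) = s
lemma sum_indicator_range (n : Nat) (s : Int) (hs : 0 ≤ s) :
    ((List.range n).map (fun (j : Nat) => if ((j : Int) - s = 0) then (1 : Int) else 0)).sum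
    = if s < (n : Int) then 1 else 0 := by
  induction n with
  | zero => simp; omega
  | succ m ih =>
    rw [List.range_succ, List.map_append, List.sum_append, ih]
    simp only [List.map_cons, List.map_nil, List.sum_cons, List.sum_nil]
    by_cases h : s = (m : Int) <;> by_cases h2 : s < (m : Int) <;>
      simp_all <;> omega

lemma bridge (k : Int) :
    ∀ (l : List Int) (s : Int), 0 ≤ s → (∀ x ∈ l, 0 ≤ x) →
    ((List.range k.toNat).map (fun (j : Nat) => cntEq l ((j : Int) - s))).sum = cntLt k l s := by
  intro l
  induction l with
  | nil =>
    intro s hs _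
    simp only [cntEq, cntLt]
    rw [sum_indicator_range _ _ hs]
    by_cases h : s < k
    · rw [if_pos h, if_pos (by omega)]
    · rw [if_neg h, if_neg (by omega)]
  | cons a t ih =>
    intro s hs hl
    have ha := hl a (by simp)
    have ht : ∀ x ∈ t, 0 ≤ x := fun x hx => hl x (by simp [hx])
    simp only [cntEq, cntLt, sub_sub]
    rw [PySem.List.sum_map_add_int, ih s hs ht, ih (s + a) (by omega) ht]

-- ===== VERDICT (by name: the statement is the Claim_ definition above) =====
theorem lc_2518_spec : Claim_equal_lc_2518 := by
  intro nums k _ hpre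
  unfold Spec_lc_2518 lc_2518 lc_2518_alt
  simp only []
  by_cases hlt : nums.sum < 2 * k
  · simp [hlt]
  · have h2k : 2 * k ≤ nums.sum := by omega
    obtain ⟨hk, hnn⟩ := hpre h2k
    simp only [if_neg hlt]
    have hinitA : (List.replicate k.toNat (0 : Int)).set 0 1
        = (List.range k.toNat).map (fun (j : Nat) => cntEq [] (j : Int)) := by
      apply List.ext_getElem
      · simp
      · intro i h1 h2
        simp only [List.length_set, List.length_replicate] at h1
        rcases Nat.eq_zero_or_pos i with hi | hi
        · subst hi
          rw [List.getElem_set_self (by simpa using h1)]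
          simp [cntEq]
        · rw [List.getElem_set_ne (by omega)]
          simp [cntEq, List.getElem_replicate]
          omega
    rw [hinitA, foldA_all k hk nums [] hnn (by simp), List.nil_append,
      foldB_all k hk nums hnn]
    have hsum : ((List.range k.toNat).map (fun (j : Nat) => cntEq nums (j : Int))).sum
        = cntLt k nums 0 := by
      have := bridge k nums 0 le_rfl hnn
      simpa using this
    have hget : ((List.range k.toNat).map (fun (s : Nat) => cntLt k nums (s : Int))).getD 0 0
        = cntLt k nums 0 := by
      rw [PySem.List.getD_map_range _ _ _ _ (by omega)]
      simp
    rw [hsum, hget]
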